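-- pv_equiv track=rewrite | github.com/MatMaxMatrix/Code-For-Fun | password_check/sub/strinct.py | suggerimenti_avanzati
-- ===== SOURCE A (Python) =====
-- def suggerimenti_avanzati(password: str, esito: bool, messaggio: str, in_lista_vietate: bool):
--     """
--     Fornisce suggerimenti per migliorare la password se risultata debole.
--     """
--     if esito:
--         return ["Password robusta."]
--
--     suggerimenti_list = []
--     if len(password) < 8:
--         suggerimenti_list.append("Allunga la password (minimo 8 caratteri)")
--     if not any(c.isupper() for c in password):
--         suggerimenti_list.append("Includi almeno una lettera maiuscola")
--     if not any(c.islower() for c in password):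
--         suggerimenti_list.append("Includi almeno una lettera minuscola")
--     if not any(c.isdigit() for c in password):
--         suggerimenti_list.append("Includi almeno un numero")
--     if not any(not c.isalnum() for c in password):
--         suggerimenti_list.append("Includi almeno un simbolo speciale")
--
--     if in_lista_vietate:
--         suggerimenti_list.append("Attenzione! La password provata è presente nella lista di password compromesse")
--
--     return suggerimenti_list
-- ===== SOURCE B (Python) =====
-- def suggerimenti_avanzati(password: str, esito: bool, messaggio: str, in_lista_vietate: bool):
--     """Classify each character once into a set of category tags, then emit the
--     suggestions for the missing categories from a message table."""
--     if esito:
--         return ["Password robusta."]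
--     presenti = set()
--     for c in password:
--         if c.isupper():
--             presenti.add("upper")
--         elif c.islower():
--             presenti.add("lower")
--         elif c.isdigit():
--             presenti.add("digit")
--         if not c.isalnum():
--             presenti.add("symbol")
--     tabella = [
--         ("upper", "Includi almeno una lettera maiuscola"),
--         ("lower", "Includi almeno una lettera minuscola"),
--         ("digit", "Includi almeno un numero"),
--         ("symbol", "Includi almeno un simbolo speciale"),
--     ]
--     out = []
--     if len(password) < 8:
--         out.append("Allunga la password (minimo 8 caratteri)")
--     out += [msg for cat, msg in tabella if cat not in presenti]
--     if in_lista_vietate: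
--         out.append("Attenzione! La password provata è presente nella lista di password compromesse")
--     return out
-- ===== Notes on version B (the rewrite author's own statement) =====
-- stated objective: alternative
-- what changed: Replaces A's five chained ifs with separate any() scans by a table-driven design: one classification pass puts category tags ('upper'/'lower'/'digit'/'symbol') into a set, and the suggestions are emitted by a comprehension over a (tag, message) rule table filtered on missing tags.
import Mathlib
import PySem

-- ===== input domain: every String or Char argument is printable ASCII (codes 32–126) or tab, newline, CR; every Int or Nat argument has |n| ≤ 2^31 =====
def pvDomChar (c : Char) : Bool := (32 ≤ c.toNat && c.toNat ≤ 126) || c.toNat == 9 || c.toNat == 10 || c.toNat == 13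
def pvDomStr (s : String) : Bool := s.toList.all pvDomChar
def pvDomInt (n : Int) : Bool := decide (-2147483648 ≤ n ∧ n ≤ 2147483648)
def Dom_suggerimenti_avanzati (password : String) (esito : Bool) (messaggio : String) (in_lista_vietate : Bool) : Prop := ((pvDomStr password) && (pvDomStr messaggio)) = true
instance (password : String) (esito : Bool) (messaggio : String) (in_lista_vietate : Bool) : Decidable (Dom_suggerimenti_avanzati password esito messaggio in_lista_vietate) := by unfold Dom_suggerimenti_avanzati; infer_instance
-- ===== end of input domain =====

-- B is table-driven: one classification pass collects a set of category tags, then the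
-- suggestions are emitted from a (tag, message) rule table for the missing tags (objective: alternative).

-- ===== PORT A =====
def suggerimenti_avanzati (password : String) (esito : Bool) (messaggio : String) (in_lista_vietate : Bool) : List String :=
  if esito then ["Password robusta."]
  else
    let l0 : List String := []
    let l1 := if PySem.Str.len password < 8 then l0 ++ ["Allunga la password (minimo 8 caratteri)"] else l0
    let l2 := if !(password.toList.any PySem.Chars.isupper) then l1 ++ ["Includi almeno una lettera maiuscola"] else l1
    let l3 := if !(password.toList.any PySem.Chars.islower) then l2 ++ ["Includi almeno una lettera minuscola"] else l2
    let l4 := if !(password.toList.any PySem.Chars.isdigit) then l3 ++ ["Includi almeno un numero"] else l3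
    let l5 := if !(password.toList.any (fun c => !PySem.Chars.isalnum c)) then l4 ++ ["Includi almeno un simbolo speciale"] else l4
    let l6 := if in_lista_vietate then l5 ++ ["Attenzione! La password provata è presente nella lista di password compromesse"] else l5
    l6

-- ===== PORT B =====
-- the loop body of Source B's classification pass: tag one character into the category set
def pvStep (s : PySem.Set String) (c : Char) : PySem.Set String :=
  let s1 :=
    if PySem.Chars.isupper c then PySem.Set.add s "upper"
    else if PySem.Chars.islower c then PySem.Set.add s "lower"
    else if PySem.Chars.isdigit c then PySem.Set.add s "digit"
    else s
  if !PySem.Chars.isalnum c then PySem.Set.add s1 "symbol" else s1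

-- the classification loop of Source B: the set of category tags present in the password
def pvPresenti (cs : List Char) : PySem.Set String :=
  cs.foldl pvStep PySem.Set.empty

-- the (tag, message) rule table of Source B
def pvTabella : List (String × String) :=
  [("upper", "Includi almeno una lettera maiuscola"),
   ("lower", "Includi almeno una lettera minuscola"),
   ("digit", "Includi almeno un numero"),
   ("symbol", "Includi almeno un simbolo speciale")]

def suggerimenti_avanzati_alt (password : String) (esito : Bool) (messaggio : String) (in_lista_vietate : Bool) : List String :=
  if esito then ["Password robusta."]
  else
    let presenti := pvPresenti password.toList
    let out0 : List String := if PySem.Str.len password < 8 then ["Allunga la password (minimo 8 caratteri)"] else []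
    let out1 := out0 ++ (pvTabella.filterMap (fun cm => if !(PySem.Set.contains presenti cm.1) then some cm.2 else none))
    let out2 := if in_lista_vietate then out1 ++ ["Attenzione! La password provata è presente nella lista di password compromesse"] else out1
    out2

-- ===== PRECONDITION & SPEC =====
def Spec_suggerimenti_avanzati (password : String) (esito : Bool) (messaggio : String) (in_lista_vietate : Bool) (out : List String) : Prop := out = suggerimenti_avanzati_alt password esito messaggio in_lista_vietate
instance (password : String) (esito : Bool) (messaggio : String) (in_lista_vietate : Bool) (out : List String) : Decidable (Spec_suggerimenti_avanzati password esito messaggio in_lista_vietate out) := by unfold Spec_suggerimenti_avanzati; infer_instance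

-- ===== CLAIM (what is proved, stated in full; the proofs are below) =====
def Claim_equal_suggerimenti_avanzati : Prop := ∀ (password : String) (esito : Bool) (messaggio : String) (in_lista_vietate : Bool), Dom_suggerimenti_avanzati password esito messaggio in_lista_vietate → Spec_suggerimenti_avanzati password esito messaggio in_lista_vietate (suggerimenti_avanzati password esito messaggio in_lista_vietate)

-- ===== LEMMAS AND PROOFS =====
-- the three Python character classes hit by the elif chain are pairwise disjoint
theorem pv_upper_not_lower (c : Char) (h : PySem.Chars.isupper c = true) : PySem.Chars.islower c = false := by
  simp only [PySem.Chars.isupper, PySem.Chars.islower, Bool.and_eq_true, decide_eq_true_eq,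
    Bool.and_eq_false_iff, decide_eq_false_iff_not, Char.le_def, UInt32.le_iff_toNat_le] at *
  have h1 : 'A'.val.toNat = 65 := rfl
  have h2 : 'Z'.val.toNat = 90 := rfl
  have h3 : 'a'.val.toNat = 97 := rfl
  omega

theorem pv_upper_not_digit (c : Char) (h : PySem.Chars.isupper c = true) : PySem.Chars.isdigit c = false := by
  simp only [PySem.Chars.isupper, PySem.Chars.isdigit, Bool.and_eq_true, decide_eq_true_eq,
    Bool.and_eq_false_iff, decide_eq_false_iff_not, Char.le_def, UInt32.le_iff_toNat_le] at *
  have h1 : 'A'.val.toNat = 65 := rfl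
  have h2 : '9'.val.toNat = 57 := rfl
  omega

theorem pv_lower_not_digit (c : Char) (h : PySem.Chars.islower c = true) : PySem.Chars.isdigit c = false := by
  simp only [PySem.Chars.islower, PySem.Chars.isdigit, Bool.and_eq_true, decide_eq_true_eq,
    Bool.and_eq_false_iff, decide_eq_false_iff_not, Char.le_def, UInt32.le_iff_toNat_le] at *
  have h1 : 'a'.val.toNat = 97 := rfl
  have h2 : '9'.val.toNat = 57 := rfl
  omega

-- one step of the classification loop, seen through membership of each tag
theorem pvStep_mem_upper (s : PySem.Set String) (c : Char) :
    ("upper" ∈ pvStep s c) ↔ ("upper" ∈ s ∨ PySem.Chars.isupper c = true) := by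
  unfold pvStep
  by_cases hu : PySem.Chars.isupper c <;>
    by_cases hl : PySem.Chars.islower c <;>
      by_cases hd : PySem.Chars.isdigit c <;>
        by_cases ha : PySem.Chars.isalnum c <;>
          simp [hu, hl, hd, ha, PySem.Set.mem_add]

theorem pvStep_mem_lower (s : PySem.Set String) (c : Char) :
    ("lower" ∈ pvStep s c) ↔ ("lower" ∈ s ∨ PySem.Chars.islower c = true) := by
  unfold pvStep
  by_cases hu : PySem.Chars.isupper c
  · have hl := pv_upper_not_lower c hu
    by_cases ha : PySem.Chars.isalnum c <;> simp [hu, hl, ha, PySem.Set.mem_add]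
  · by_cases hl : PySem.Chars.islower c <;>
      by_cases hd : PySem.Chars.isdigit c <;>
        by_cases ha : PySem.Chars.isalnum c <;>
          simp [hu, hl, hd, ha, PySem.Set.mem_add]

theorem pvStep_mem_digit (s : PySem.Set String) (c : Char) :
    ("digit" ∈ pvStep s c) ↔ ("digit" ∈ s ∨ PySem.Chars.isdigit c = true) := by
  unfold pvStep
  by_cases hu : PySem.Chars.isupper c
  · have hd := pv_upper_not_digit c hu
    by_cases ha : PySem.Chars.isalnum c <;> simp [hu, hd, ha, PySem.Set.mem_add]
  · by_cases hl : PySem.Chars.islower c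
    · have hd := pv_lower_not_digit c hl
      by_cases ha : PySem.Chars.isalnum c <;> simp [hu, hl, hd, ha, PySem.Set.mem_add]
    · by_cases hd : PySem.Chars.isdigit c <;>
        by_cases ha : PySem.Chars.isalnum c <;>
          simp [hu, hl, hd, ha, PySem.Set.mem_add]

theorem pvStep_mem_symbol (s : PySem.Set String) (c : Char) :
    ("symbol" ∈ pvStep s c) ↔ ("symbol" ∈ s ∨ PySem.Chars.isalnum c = false) := by
  unfold pvStep
  by_cases hu : PySem.Chars.isupper c <;>
    by_cases hl : PySem.Chars.islower c <;>
      by_cases hd : PySem.Chars.isdigit c <;>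
        by_cases ha : PySem.Chars.isalnum c <;>
          simp [hu, hl, hd, ha, PySem.Set.mem_add]

-- the whole loop, by induction, for each tag
theorem pvFold_mem_upper (cs : List Char) : ∀ s : PySem.Set String,
    ("upper" ∈ cs.foldl pvStep s) ↔ ("upper" ∈ s ∨ cs.any PySem.Chars.isupper = true) := by
  induction cs with
  | nil => simp
  | cons c cs ih =>
      intro s
      rw [List.foldl_cons, ih, pvStep_mem_upper, List.any_cons]
      simp only [Bool.or_eq_true]
      tauto

theorem pvFold_mem_lower (cs : List Char) : ∀ s : PySem.Set String,
    ("lower" ∈ cs.foldl pvStep s) ↔ ("lower" ∈ s ∨ cs.any PySem.Chars.islower = true) := by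
  induction cs with
  | nil => simp
  | cons c cs ih =>
      intro s
      rw [List.foldl_cons, ih, pvStep_mem_lower, List.any_cons]
      simp only [Bool.or_eq_true]
      tauto

theorem pvFold_mem_digit (cs : List Char) : ∀ s : PySem.Set String,
    ("digit" ∈ cs.foldl pvStep s) ↔ ("digit" ∈ s ∨ cs.any PySem.Chars.isdigit = true) := by
  induction cs with
  | nil => simp
  | cons c cs ih =>
      intro s
      rw [List.foldl_cons, ih, pvStep_mem_digit, List.any_cons]
      simp only [Bool.or_eq_true]
      tauto

theorem pvFold_mem_symbol (cs : List Char) : ∀ s : PySem.Set String,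
    ("symbol" ∈ cs.foldl pvStep s) ↔ ("symbol" ∈ s ∨ cs.any (fun c => !PySem.Chars.isalnum c) = true) := by
  induction cs with
  | nil => simp
  | cons c cs ih =>
      intro s
      rw [List.foldl_cons, ih, pvStep_mem_symbol, List.any_cons]
      simp only [Bool.or_eq_true, Bool.not_eq_true']
      tauto

theorem pv_contains_presenti (cs : List Char) :
    (PySem.Set.contains (pvPresenti cs) "upper" = cs.any PySem.Chars.isupper) ∧
    (PySem.Set.contains (pvPresenti cs) "lower" = cs.any PySem.Chars.islower) ∧
    (PySem.Set.contains (pvPresenti cs) "digit" = cs.any PySem.Chars.isdigit) ∧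
    (PySem.Set.contains (pvPresenti cs) "symbol" = cs.any (fun c => !PySem.Chars.isalnum c)) := by
  unfold pvPresenti
  refine ⟨?_, ?_, ?_, ?_⟩ <;>
    · apply Bool.eq_iff_iff.mpr
      rw [PySem.Set.contains_iff]
      first
        | rw [pvFold_mem_upper]
        | rw [pvFold_mem_lower]
        | rw [pvFold_mem_digit]
        | rw [pvFold_mem_symbol]
      simp [PySem.Set.empty]

-- ===== VERDICT (by name: the statement is the Claim_ definition above) =====
theorem suggerimenti_avanzati_spec : Claim_equal_suggerimenti_avanzati := by
  intro password esito messaggio in_lista_vietate _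
  unfold Spec_suggerimenti_avanzati suggerimenti_avanzati suggerimenti_avanzati_alt
  cases esito with
  | true => rfl
  | false =>
      obtain ⟨h1, h2, h3, h4⟩ := pv_contains_presenti password.toList
      simp only [pvTabella, List.filterMap, h1, h2, h3, h4]
      cases hu : password.toList.any PySem.Chars.isupper <;>
        cases hl : password.toList.any PySem.Chars.islower <;>
          cases hd : password.toList.any PySem.Chars.isdigit <;>
            cases hs : password.toList.any (fun c => !PySem.Chars.isalnum c) <;>
              simp
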